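-- pv_equiv track=rewrite | github.com/rec2025/InterLeavingProject | interleaving_function_wantedly.py | interleaving
-- ===== SOURCE A (Python) =====
-- from typing import List
--
-- def new_ranking(user_id: int, page: int, per_page: int) -> List[int]:
--     ids = [i for i in range(1, 31)]  # 新しいアルゴリズムのダミー結果
--     start = (page - 1) * per_page
--     return ids[start:start + per_page]
--
-- def old_ranking(user_id: int, page: int, per_page: int) -> List[int]:
--     ids = [30 - i for i in range(30)]  # 古いアルゴリズムのダミー結果（逆順）
--     start = (page - 1) * per_page
--     return ids[start:start + per_page]
--
-- def interleaving(user_id: int, page: int, per_page: int) -> List[int]: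
--     new_ids = new_ranking(user_id, 1, 1000)
--     old_ids = old_ranking(user_id, 1, 1000)
--
--     seen = set()
--     result = []
--
--     i = j = 0
--     toggle = True  # new -> old -> new -> ...
--
--     while len(result) < page * per_page and (i < len(new_ids) or j < len(old_ids)):
--         if toggle and i < len(new_ids):
--             if new_ids[i] not in seen:
--                 seen.add(new_ids[i])
--                 result.append(new_ids[i])
--             i += 1
--         elif not toggle and j < len(old_ids):
--             if old_ids[j] not in seen:
--                 seen.add(old_ids[j])
--                 result.append(old_ids[j])
--             j += 1
--         toggle = not toggle
--
--     start = (page - 1) * per_page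
--     return result[start:start + per_page]
-- ===== SOURCE B (Python) =====
-- from typing import List
--
-- def interleaving(user_id: int, page: int, per_page: int) -> List[int]:
--     # The deduped interleaving of [1..30] and [30..1] is the fixed sequence 1,30,2,29,...,15,16
--     seq = [v for k in range(15) for v in (k + 1, 30 - k)]
--     result = seq[:max(page * per_page, 0)]
--     start = (page - 1) * per_page
--     return result[start:start + per_page]
-- ===== Notes on version B (the rewrite author's own statement) =====
-- stated objective: simpler
-- what changed: The two rankings are constants, so B builds the fixed deduped interleaved sequence [1,30,2,29,...,15,16] with one comprehension and takes prefixes/slices arithmetically, eliminating A's while loop with two pointers, a toggle and a seen-set.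
import Mathlib
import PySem

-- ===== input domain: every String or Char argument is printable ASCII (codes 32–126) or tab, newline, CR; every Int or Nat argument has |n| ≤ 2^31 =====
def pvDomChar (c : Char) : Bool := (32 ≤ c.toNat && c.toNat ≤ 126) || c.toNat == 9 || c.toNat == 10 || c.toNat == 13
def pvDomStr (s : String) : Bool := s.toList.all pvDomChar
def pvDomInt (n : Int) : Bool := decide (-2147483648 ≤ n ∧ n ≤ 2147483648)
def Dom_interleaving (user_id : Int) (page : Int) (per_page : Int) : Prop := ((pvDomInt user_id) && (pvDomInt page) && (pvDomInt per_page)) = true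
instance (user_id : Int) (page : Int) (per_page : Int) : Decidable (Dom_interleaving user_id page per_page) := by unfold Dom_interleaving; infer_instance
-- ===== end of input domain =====

-- B replaces A's toggle/two-pointer/seen-set while-loop by building the fixed deduped
-- interleaved sequence [1,30,2,29,…] directly with one comprehension (objective: simpler).

-- ===== PORT A =====
def new_ranking (user_id : Int) (page : Int) (per_page : Int) : List Int :=
  let ids := PySem.List.pyRange 1 31 1
  let start := (page - 1) * per_page
  PySem.List.slice ids (some start) (some (start + per_page))

def old_ranking (user_id : Int) (page : Int) (per_page : Int) : List Int :=
  let ids := (PySem.List.pyRange 0 30 1).map (fun i => 30 - i)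
  let start := (page - 1) * per_page
  PySem.List.slice ids (some start) (some (start + per_page))

-- A's while loop; fuel only makes the recursion total (121 iterations suffice, 130 are given)
def interleavingLoop (fuel : Nat) (cap : Int) (newIds oldIds : List Int)
    (seen : PySem.Set Int) (result : List Int) (i j : Nat) (toggle : Bool) : List Int :=
  match fuel with
  | 0 => result
  | fuel + 1 =>
    if (result.length : Int) < cap ∧ (i < newIds.length ∨ j < oldIds.length) then
      if toggle = true ∧ i < newIds.length then
        let x := newIds.getD i 0   -- guard i < len makes this exactly new_ids[i]
        if PySem.Set.contains seen x then
          interleavingLoop fuel cap newIds oldIds seen result (i + 1) j (!toggle)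
        else
          interleavingLoop fuel cap newIds oldIds (PySem.Set.add seen x) (result ++ [x]) (i + 1) j (!toggle)
      else if toggle = false ∧ j < oldIds.length then
        let x := oldIds.getD j 0   -- guard j < len makes this exactly old_ids[j]
        if PySem.Set.contains seen x then
          interleavingLoop fuel cap newIds oldIds seen result i (j + 1) (!toggle)
        else
          interleavingLoop fuel cap newIds oldIds (PySem.Set.add seen x) (result ++ [x]) i (j + 1) (!toggle)
      else
        interleavingLoop fuel cap newIds oldIds seen result i j (!toggle)
    else result

def interleaving (user_id : Int) (page : Int) (per_page : Int) : List Int :=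
  let new_ids := new_ranking user_id 1 1000
  let old_ids := old_ranking user_id 1 1000
  let result := interleavingLoop 130 (page * per_page) new_ids old_ids PySem.Set.empty [] 0 0 true
  let start := (page - 1) * per_page
  PySem.List.slice result (some start) (some (start + per_page))

-- ===== PORT B =====
def interleaving_alt (user_id : Int) (page : Int) (per_page : Int) : List Int :=
  let seq := (PySem.List.pyRange 0 15 1).flatMap (fun k => [k + 1, 30 - k])
  let result := PySem.List.slice seq none (some (max (page * per_page) 0))
  let start := (page - 1) * per_page
  PySem.List.slice result (some start) (some (start + per_page))

-- ===== PRECONDITION & SPEC =====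
def Spec_interleaving (user_id : Int) (page : Int) (per_page : Int) (out : List Int) : Prop := out = interleaving_alt user_id page per_page
instance (user_id : Int) (page : Int) (per_page : Int) (out : List Int) : Decidable (Spec_interleaving user_id page per_page out) := by unfold Spec_interleaving; infer_instance

-- ===== CLAIM (what is proved, stated in full; the proofs are below) =====
def Claim_equal_interleaving : Prop := ∀ (user_id : Int) (page : Int) (per_page : Int), Dom_interleaving user_id page per_page → Spec_interleaving user_id page per_page (interleaving user_id page per_page)

-- ===== LEMMAS AND PROOFS =====

-- the two fixed 30-element rankings and B's fixed sequence
def pvNewIds : List Int := new_ranking 0 1 1000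
def pvOldIds : List Int := old_ranking 0 1 1000
def pvSeq : List Int := (PySem.List.pyRange 0 15 1).flatMap (fun k => [k + 1, 30 - k])

-- the loop reads cap only through `result.length < cap`, and result.length ≤ i + j ≤ 60
theorem loop_cap_congr (fuel : Nat) (cap cap' : Int)
    (hiff : ∀ m : Nat, m ≤ 60 → (((m : Int) < cap) ↔ ((m : Int) < cap'))) :
    ∀ (seen : PySem.Set Int) (result : List Int) (i j : Nat) (toggle : Bool),
    result.length ≤ i + j → i ≤ 30 → j ≤ 30 →
    interleavingLoop fuel cap pvNewIds pvOldIds seen result i j toggle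
      = interleavingLoop fuel cap' pvNewIds pvOldIds seen result i j toggle := by
  induction fuel with
  | zero => intros; rfl
  | succ fuel ih =>
    intro seen result i j toggle hlen hi hj
    have hlens : pvNewIds.length = 30 ∧ pvOldIds.length = 30 := by decide
    have hcond : (((result.length : Int) < cap ∧ (i < pvNewIds.length ∨ j < pvOldIds.length))
        ↔ ((result.length : Int) < cap' ∧ (i < pvNewIds.length ∨ j < pvOldIds.length))) := by
      have := hiff result.length (by omega)
      tauto
    simp only [interleavingLoop]
    by_cases h : (result.length : Int) < cap ∧ (i < pvNewIds.length ∨ j < pvOldIds.length)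
    · rw [if_pos h, if_pos (hcond.mp h)]
      by_cases h1 : toggle = true ∧ i < pvNewIds.length
      · rw [if_pos h1, if_pos h1]
        by_cases hc : PySem.Set.contains seen (pvNewIds.getD i 0)
        · simp only [if_pos hc]; exact ih seen result (i + 1) j (!toggle) (by omega) (by omega) hj
        · simp only [if_neg hc]
          exact ih _ (result ++ [pvNewIds.getD i 0]) (i + 1) j (!toggle)
            (by simp; omega) (by omega) hj
      · rw [if_neg h1, if_neg h1]
        by_cases h2 : toggle = false ∧ j < pvOldIds.length
        · rw [if_pos h2, if_pos h2]
          by_cases hc : PySem.Set.contains seen (pvOldIds.getD j 0)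
          · simp only [if_pos hc]; exact ih seen result i (j + 1) (!toggle) (by omega) hi (by omega)
          · simp only [if_neg hc]
            exact ih _ (result ++ [pvOldIds.getD j 0]) i (j + 1) (!toggle)
              (by simp; omega) hi (by omega)
        · rw [if_neg h2, if_neg h2]
          exact ih seen result i j (!toggle) hlen hi hj
    · rw [if_neg h, if_neg (fun h' => h (hcond.mpr h'))]

-- evaluating the loop at each clamped cap 0..61 gives the corresponding prefix of pvSeq
set_option maxRecDepth 40000 in
theorem loop_eval (n : Nat) (hn : n ≤ 61) :
    interleavingLoop 130 (n : Int) pvNewIds pvOldIds PySem.Set.empty [] 0 0 true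
      = pvSeq.take n := by
  interval_cases n <;> rfl

theorem loop_eq_take (cap : Int) :
    interleavingLoop 130 cap pvNewIds pvOldIds PySem.Set.empty [] 0 0 true
      = pvSeq.take (max cap 0).toNat := by
  set n : Nat := (min (max cap 0) 61).toNat with hn
  have h1 : interleavingLoop 130 cap pvNewIds pvOldIds PySem.Set.empty [] 0 0 true
      = interleavingLoop 130 (n : Int) pvNewIds pvOldIds PySem.Set.empty [] 0 0 true := by
    apply loop_cap_congr 130 cap (n : Int) (fun m hm => by omega) PySem.Set.empty [] 0 0 true
      (by simp) (by omega) (by omega)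
  rw [h1, loop_eval n (by omega)]
  rcases le_or_gt (max cap 0) 61 with h | h
  · congr 1; omega
  · have hlen : pvSeq.length = 30 := by decide
    rw [List.take_of_length_le (by omega), List.take_of_length_le (by omega)]

-- ===== VERDICT (by name: the statement is the Claim_ definition above) =====
theorem interleaving_spec : Claim_equal_interleaving := by
  intro user_id page per_page _
  unfold Spec_interleaving interleaving interleaving_alt
  have hnew : new_ranking user_id 1 1000 = pvNewIds := rfl
  have hold : old_ranking user_id 1 1000 = pvOldIds := rfl
  dsimp only
  rw [hnew, hold, loop_eq_take (page * per_page)]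
  rw [PySem.List.slice_to _ (le_max_right _ _)]
  rfl
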